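-- pv_equiv track=rewrite | github.com/lanzv/Master-Thesis | models/src/models/bert/util.py | label2text_ids
-- ===== SOURCE A (Python) =====
-- def label2text_ids(text_ids, labels):
--     '''
--     Input: a list of token ids and a list of labels,
--     Return: a list of words.
--
--     e.g. text_ids=[x1, x2, x3, x4, x5, x6], labels=[0, 0, 1, 0, 0, 1]
--         --> [[x1], [x2, x3], [x4], [x5, x6]]
--     '''
--     #assert len(text_ids) == len(labels)
--     word_ids = []
--     p = 0
--     for i in range(len(labels)):
--         if labels[i] == 0: # label 'B'
--             word_ids.append(text_ids[p:i])
--             p = i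
--         if i == len(labels) - 1:
--             word_ids.append(text_ids[p:])
--     return word_ids[1:]
-- ===== SOURCE B (Python) =====
-- def label2text_ids(text_ids, labels):
--     starts = [i for i in range(len(labels)) if labels[i] == 0]
--     words = []
--     for j in range(len(starts)):
--         end = starts[j + 1] if j + 1 < len(starts) else len(text_ids)
--         words.append(text_ids[starts[j]:end])
--     return words
-- ===== Notes on version B (the rewrite author's own statement) =====
-- stated objective: simpler
-- what changed: Instead of A's single stateful loop that carries a previous-boundary pointer, appends a throwaway pre-first-boundary chunk and drops it with [1:], B first collects the word-start positions (labels[i]==0) and then slices text_ids between consecutive starts (last start to len(text_ids)).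
import Mathlib
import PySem

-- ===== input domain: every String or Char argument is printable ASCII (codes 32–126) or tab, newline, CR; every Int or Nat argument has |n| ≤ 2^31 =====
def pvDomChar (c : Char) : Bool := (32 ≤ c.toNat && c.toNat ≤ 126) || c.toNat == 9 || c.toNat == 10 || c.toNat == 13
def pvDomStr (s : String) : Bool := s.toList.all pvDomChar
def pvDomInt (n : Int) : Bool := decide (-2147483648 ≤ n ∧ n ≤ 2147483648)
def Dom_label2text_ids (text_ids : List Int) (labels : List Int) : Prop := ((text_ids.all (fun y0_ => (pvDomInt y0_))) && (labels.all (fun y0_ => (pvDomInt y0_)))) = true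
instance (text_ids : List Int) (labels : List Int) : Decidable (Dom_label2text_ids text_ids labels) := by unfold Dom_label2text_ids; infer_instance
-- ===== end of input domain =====

-- B re-decomposes A's single stateful loop as: collect the word-start positions (labels[i]==0),
-- then slice text_ids between consecutive starts (objective: simpler; same return value, same cost).

-- ===== PORT A =====
-- literal transliteration of A: one loop over range(len(labels)) carrying (word_ids, p),
-- appending text_ids[p:i] at each zero label and text_ids[p:] at the last index; returns word_ids[1:]
def label2text_ids (text_ids : List Int) (labels : List Int) : List (List Int) :=
  let n : Int := (labels.length : Int)
  let st :=
    (PySem.List.pyRange 0 n 1).foldl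
      (fun (s : List (List Int) × Int) i =>
        let s := if PySem.List.pyGetD labels i 0 = 0 then
                   (s.1 ++ [PySem.List.slice text_ids (some s.2) (some i)], i)
                 else s
        if i = n - 1 then (s.1 ++ [PySem.List.slice text_ids (some s.2) none], s.2)
        else s)
      ([], 0)
  PySem.List.slice st.1 (some 1) none

-- ===== PORT B =====
-- literal transliteration of B (Source B): starts = [i for i in range(len(labels)) if labels[i]==0],
-- then for each j append text_ids[starts[j] : (starts[j+1] if j+1 < len(starts) else len(text_ids))]
def label2text_ids_alt (text_ids : List Int) (labels : List Int) : List (List Int) :=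
  let starts := (PySem.List.pyRange 0 (labels.length : Int) 1).filter
      (fun i => decide (PySem.List.pyGetD labels i 0 = 0))
  (PySem.List.pyRange 0 (starts.length : Int) 1).foldl
    (fun words j =>
      let e : Int := if j + 1 < (starts.length : Int)
                     then PySem.List.pyGetD starts (j + 1) 0
                     else (text_ids.length : Int)
      words ++ [PySem.List.slice text_ids (some (PySem.List.pyGetD starts j 0)) (some e)])
    []

-- ===== PRECONDITION & SPEC =====
def Spec_label2text_ids (text_ids : List Int) (labels : List Int) (out : List (List Int)) : Prop := out = label2text_ids_alt text_ids labels
instance (text_ids : List Int) (labels : List Int) (out : List (List Int)) : Decidable (Spec_label2text_ids text_ids labels out) := by unfold Spec_label2text_ids; infer_instance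

-- ===== CLAIM (what is proved, stated in full; the proofs are below) =====
def Claim_equal_label2text_ids : Prop := ∀ (text_ids : List Int) (labels : List Int), Dom_label2text_ids text_ids labels → Spec_label2text_ids text_ids labels (label2text_ids text_ids labels)

-- ===== LEMMAS AND PROOFS =====

-- a guarded fold is the fold of the step over the filtered list
lemma foldl_if_filter {α β : Type} (P : α → Prop) [DecidablePred P] (step : β → α → β) :
    ∀ (r : List α) (init : β),
      r.foldl (fun s i => if P i then step s i else s) init
        = (r.filter (fun i => decide (P i))).foldl step init := by
  intro r
  induction r with
  | nil => intro init; rfl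
  | cons a r ih =>
      intro init
      by_cases h : P a <;> simp [h, ih]

-- A's zero-branch fold over the list of start positions, in closed form
lemma stateZ (text_ids : List Int) :
    ∀ (Z : List Int) (acc : List (List Int)) (p : Int),
      Z.foldl (fun (s : List (List Int) × Int) z =>
          (s.1 ++ [PySem.List.slice text_ids (some s.2) (some z)], z)) (acc, p)
        = (acc ++ List.zipWith (fun a b => PySem.List.slice text_ids (some a) (some b)) (p :: Z) Z,
           Z.getLastD p) := by
  intro Z
  induction Z with
  | nil => intro acc p; simp
  | cons z R ih =>
      intro acc p
      simp [ih]
      cases R with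
      | nil => simp
      | cons a t =>
          obtain ⟨y, hy⟩ := Option.isSome_iff_exists.mp
            (List.getLast?_isSome.mpr (List.cons_ne_nil a t))
          simp [hy]

-- text_ids[z:] = text_ids[z:len(text_ids)] for 0 ≤ z
lemma slice_from_eq_slice_len (text_ids : List Int) (z : Int) (hz : 0 ≤ z) :
    PySem.List.slice text_ids (some z) none
      = PySem.List.slice text_ids (some z) (some (text_ids.length : Int)) := by
  rw [PySem.List.slice_from _ hz, PySem.List.slice_toNat _ hz (by positivity)]
  rw [List.take_of_length_le]
  simp

-- the chunk list A produces after the drop, as B's indexed map over the starts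
lemma key (text_ids : List Int) :
    ∀ (Z : List Int) (z0 : Int), 0 ≤ z0 → (∀ z ∈ Z, 0 ≤ z) →
      List.zipWith (fun a b => PySem.List.slice text_ids (some a) (some b)) (z0 :: Z) Z
          ++ [PySem.List.slice text_ids (some ((z0 :: Z).getLastD 0)) none]
        = (List.range (z0 :: Z).length).map (fun k =>
            PySem.List.slice text_ids (some ((z0 :: Z).getD k 0))
              (some (if (k : Int) + 1 < (((z0 :: Z).length : Nat) : Int)
                     then (z0 :: Z).getD (k + 1) 0
                     else (text_ids.length : Int)))) := by
  intro Z
  induction Z with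
  | nil =>
      intro z0 h0 _
      simp [List.range_succ, slice_from_eq_slice_len text_ids z0 h0]
  | cons z1 R ih =>
      intro z0 h0 h
      have h1 : (0:Int) ≤ z1 := h z1 (by simp)
      have hR : ∀ z ∈ R, (0:Int) ≤ z := fun z hz => h z (by simp [hz])
      rw [List.length_cons, List.range_succ_eq_map, List.map_cons, List.map_map]
      simp only [List.zipWith_cons_cons, List.cons_append]
      congr 1
      · simp only [List.length_cons]
        split_ifs with hcond
        · simp
        · exfalso; push_cast at hcond; omega
      · have hgl : (z0 :: z1 :: R).getLastD 0 = (z1 :: R).getLastD 0 := by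
          simp only [List.getLastD_cons]
        rw [hgl, ih z1 h1 hR]
        apply List.map_congr_left
        intro k hk
        have hk' := List.mem_range.mp hk
        simp only [Function.comp_apply, List.getD_cons_succ, List.length_cons, Nat.succ_eq_add_one]
        by_cases hc : (k : Int) + 1 < ((R.length + 1 : Nat) : Int)
        · rw [if_pos hc, if_pos (by push_cast at hc ⊢; omega)]
        · rw [if_neg hc, if_neg (by push_cast at hc ⊢; omega)]

lemma main_eq (text_ids labels : List Int) :
    label2text_ids text_ids labels = label2text_ids_alt text_ids labels := by
  unfold label2text_ids label2text_ids_alt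
  by_cases hn : labels.length = 0
  · simp [hn, PySem.List.pyRange_one_eq_nil (le_refl (0:Int)), PySem.List.slice_from_one]
  -- n ≥ 1
  have hn1 : 1 ≤ (labels.length : Int) := by omega
  simp only []
  set n : Int := (labels.length : Int) with hn_def
  set step : (List (List Int) × Int) → Int → (List (List Int) × Int) :=
    fun s z => (s.1 ++ [PySem.List.slice text_ids (some s.2) (some z)], z) with hstep
  set f : (List (List Int) × Int) → Int → (List (List Int) × Int) :=
    fun s i => if PySem.List.pyGetD labels i 0 = 0 then step s i else s with hf
  set g : (List (List Int) × Int) → Int → (List (List Int) × Int) :=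
    fun s i =>
      let s := if PySem.List.pyGetD labels i 0 = 0 then
                 (s.1 ++ [PySem.List.slice text_ids (some s.2) (some i)], i)
               else s
      if i = n - 1 then (s.1 ++ [PySem.List.slice text_ids (some s.2) none], s.2)
      else s with hg
  have hsplit : PySem.List.pyRange 0 n 1 = PySem.List.pyRange 0 (n-1) 1 ++ [n-1] := by
    have h := PySem.List.pyRange_one_succ_right (a := 0) (b := n - 1) (by omega)
    rw [sub_add_cancel] at h
    exact h
  have hpre : (PySem.List.pyRange 0 (n-1) 1).foldl g ([], 0)
      = (PySem.List.pyRange 0 (n-1) 1).foldl f ([], 0) := by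
    apply PySem.List.foldl_congr_mem
    intro acc x hx
    have hx' := (PySem.List.mem_pyRange_one.mp hx).2
    have hne : ¬ x = n - 1 := by omega
    simp [hg, hf, hstep, hne]
  have hlast : ∀ s : List (List Int) × Int, g s (n-1)
      = ((f s (n-1)).1 ++ [PySem.List.slice text_ids (some (f s (n-1)).2) none], (f s (n-1)).2) := by
    intro s
    by_cases hc : PySem.List.pyGetD labels (n-1) 0 = 0 <;> simp [hg, hf, hstep, hc]
  set Z : List Int := (PySem.List.pyRange 0 n 1).filter
      (fun i => decide (PySem.List.pyGetD labels i 0 = 0)) with hZ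
  have hS' : (PySem.List.pyRange 0 n 1).foldl f ([], 0)
      = (List.zipWith (fun a b => PySem.List.slice text_ids (some a) (some b)) (0 :: Z) Z,
         Z.getLastD 0) := by
    rw [hf, hstep, foldl_if_filter
      (fun i => PySem.List.pyGetD labels i 0 = 0)
      (fun (s : List (List Int) × Int) z =>
        (s.1 ++ [PySem.List.slice text_ids (some s.2) (some z)], z)),
      ← hZ, stateZ text_ids Z [] 0]
    simp
  have hwhole : (PySem.List.pyRange 0 n 1).foldl f ([], 0)
      = f ((PySem.List.pyRange 0 (n-1) 1).foldl f ([], 0)) (n-1) := by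
    rw [hsplit]
    simp only [List.foldl_append, List.foldl_cons, List.foldl_nil]
  rw [hwhole] at hS'
  have hA : (PySem.List.pyRange 0 n 1).foldl g ([], 0)
      = (List.zipWith (fun a b => PySem.List.slice text_ids (some a) (some b)) (0 :: Z) Z
           ++ [PySem.List.slice text_ids (some (Z.getLastD 0)) none], Z.getLastD 0) := by
    rw [hsplit]
    simp only [List.foldl_append, List.foldl_cons, List.foldl_nil]
    rw [hpre, hlast, hS']
  rw [hA]
  simp only [PySem.List.slice_from_one]
  -- B side: fold appending one slice per start index = map over the range of start positions
  rw [PySem.List.foldl_append_singleton_eq_map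
    (fun j => PySem.List.slice text_ids (some (PySem.List.pyGetD Z j 0))
      (some (if j + 1 < (Z.length : Int) then PySem.List.pyGetD Z (j + 1) 0
             else (text_ids.length : Int))))]
  rw [PySem.List.pyRange_zero_nat Z.length, List.map_map, List.nil_append]
  have hZnn : ∀ z ∈ Z, (0:Int) ≤ z := by
    intro z hz
    rw [hZ] at hz
    exact (PySem.List.mem_pyRange_one.mp (List.mem_filter.mp hz).1).1
  clear_value Z
  cases Z with
  | nil => simp
  | cons z0 Zr =>
      have h0 : (0:Int) ≤ z0 := hZnn z0 (by simp)
      have hZr : ∀ z ∈ Zr, (0:Int) ≤ z := fun z hz => hZnn z (by simp [hz])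
      simp only [List.zipWith_cons_cons, List.cons_append, List.tail_cons]
      rw [key text_ids Zr z0 h0 hZr]
      apply List.map_congr_left
      intro k hk
      simp only [Function.comp_apply]
      rw [show ((k : Int) + 1) = ((k + 1 : Nat) : Int) from by push_cast; ring]
      simp only [PySem.List.pyGetD_natCast]

-- ===== VERDICT (by name: the statement is the Claim_ definition above) =====
theorem label2text_ids_spec : Claim_equal_label2text_ids := by
  intro text_ids labels _
  unfold Spec_label2text_ids
  exact main_eq text_ids labels
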